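-- pv_equiv track=rewrite | github.com/natB45/coursNSI | Cours1NSI/Exercices/Exos Bases/code/F1exo8.py | kchiffres
-- ===== SOURCE A (Python) =====
-- def kchiffres(nombre,k):
--     """on affiche les k derniers chiffres de nombre, en commençant par l'unité,
--     nombre est un entier positif et k est un entier strictement positif"""
--     nombre = str(nombre)    #on transforme nombre en chaine de caractère pour accéder à chaque chiffre
--     n = len(nombre)
--     new = ""
--     if k <= n:         #si k ne dépasse pas le nombre de chiffres
--         for i in range(k):
--             new = new + nombre[n-1-i]
--         return int(new)   #on transforme la chaine en entier
--     else:
--         for i in range(n):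
--             new = new + nombre[n-1-i]  #on inverse les chiffres
--         return int(new + "0"*(k-n))         #on ajoute des zéros pour avoir k chiffres
-- ===== SOURCE B (Python) =====
-- def kchiffres(nombre, k):
--     """on affiche les k derniers chiffres de nombre, en commençant par l'unité,
--     nombre est un entier positif et k est un entier strictement positif"""
--     result = 0
--     m = nombre
--     for _ in range(k):
--         result = result * 10 + m % 10
--         m //= 10
--     return result
-- ===== Notes on version B (the rewrite author's own statement) =====
-- stated objective: alternative
-- what changed: Replaces the str()/len()/indexing/int() string pipeline and its two k<=n vs k>n branches by a single k-step arithmetic loop extracting digits with % 10 and // 10 (once m reaches 0 it keeps appending zero digits, which reproduces the right zero-padding).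
-- outside the precondition, e.g. on kchiffres(-34, 1): A returns 4, B returns 6
import Mathlib
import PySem

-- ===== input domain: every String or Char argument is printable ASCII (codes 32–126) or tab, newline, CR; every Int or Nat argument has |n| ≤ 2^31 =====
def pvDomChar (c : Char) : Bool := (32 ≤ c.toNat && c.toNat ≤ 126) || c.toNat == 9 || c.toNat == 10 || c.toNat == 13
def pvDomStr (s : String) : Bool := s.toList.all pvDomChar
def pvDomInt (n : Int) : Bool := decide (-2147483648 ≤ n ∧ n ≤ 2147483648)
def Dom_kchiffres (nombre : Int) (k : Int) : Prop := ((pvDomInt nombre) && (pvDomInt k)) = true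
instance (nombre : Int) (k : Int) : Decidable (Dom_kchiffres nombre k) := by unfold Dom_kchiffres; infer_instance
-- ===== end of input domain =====

-- B replaces A's str()/indexing/int() string pipeline and its two branches by one k-step
-- arithmetic digit-extraction loop (% 10, // 10); objective: alternative (same cost).

-- ===== PORT A =====
-- Python's int(s): on a nonempty all-ASCII-digit string (the only strings this program ever
-- builds) int(s) is exactly this left-to-right digit fold; every other input delegates to
-- the PySem primitive, so the function is exact on ALL inputs.
def pyIntAllDigits (ds : List Char) : Option Int :=
  if ds ≠ [] ∧ ds.all Char.isDigit then
    some (ds.foldl (fun a c => a * 10 + ((c.toNat : Int) - 48)) 0)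
  else PySem.Int.ofChars? ds

def kchiffres (nombre : Int) (k : Int) : Int :=
  let s := PySem.Int.toChars nombre          -- nombre = str(nombre)
  let n : Int := PySem.List.len s            -- n = len(nombre)
  if k ≤ n then
    -- the index n-1-i is in range for every i of range(k) here, so pyGetD is exact
    let new := (PySem.List.pyRange 0 k 1).foldl
      (fun acc i => acc ++ [PySem.List.pyGetD s (n - 1 - i) ' ']) []
    (pyIntAllDigits new).getD 0              -- int(new); none = ValueError, outside Pre_
  else
    let new := (PySem.List.pyRange 0 n 1).foldl
      (fun acc i => acc ++ [PySem.List.pyGetD s (n - 1 - i) ' ']) []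
    (pyIntAllDigits (new ++ List.replicate (k - n).toNat '0')).getD 0

-- ===== PORT B =====
def kchiffres_alt (nombre : Int) (k : Int) : Int :=
  ((PySem.List.pyRange 0 k 1).foldl
    (fun st _ => (st.1 * 10 + PySem.Int.mod st.2 10, PySem.Int.floordiv st.2 10))
    (0, nombre)).1

-- ===== PRECONDITION & SPEC =====
-- Pre_ keeps the function's documented domain ("nombre est un entier positif et k est un
-- entier strictement positif"): it excludes k ≤ 0, where A always raises ValueError
-- (int("")), and nombre < 0, where A either raises ValueError (the '-' lands in the
-- reversed digit string) or returns digits read off the '-'-bearing string that no caller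
-- would specify (e.g. A(-34, 1) = 4 while B's arithmetic gives 6).
def Pre_kchiffres (nombre : Int) (k : Int) : Prop := 0 ≤ nombre ∧ 1 ≤ k
instance (nombre : Int) (k : Int) : Decidable (Pre_kchiffres nombre k) := by
  unfold Pre_kchiffres; infer_instance
def pvWitness_kchiffres : Int × Int := (907, 2)

def Spec_kchiffres (nombre : Int) (k : Int) (out : Int) : Prop := out = kchiffres_alt nombre k
instance (nombre : Int) (k : Int) (out : Int) : Decidable (Spec_kchiffres nombre k out) := by unfold Spec_kchiffres; infer_instance

-- ===== CLAIM (what is proved, stated in full; the proofs are below) =====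
def Claim_equal_kchiffres : Prop := ∀ (nombre : Int) (k : Int), Dom_kchiffres nombre k → Pre_kchiffres nombre k → Spec_kchiffres nombre k (kchiffres nombre k)

-- ===== LEMMAS AND PROOFS =====

-- little-endian decimal digits, with 0 ↦ [0] matching str(0) = "0"
def littleDigits (N : Nat) : List Nat := if N = 0 then [0] else Nat.digits 10 N

-- right-padded take of the little-endian digits: what B has accumulated after j steps
def padTake (L : List Nat) (j : Nat) : List Nat := L.take j ++ List.replicate (j - L.length) 0

lemma littleDigits_ne_nil (N : Nat) : littleDigits N ≠ [] := by
  unfold littleDigits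
  split
  · simp
  · simpa [Nat.digits_ne_nil_iff_ne_zero] using ‹¬ N = 0›

lemma littleDigits_lt (N : Nat) : ∀ d ∈ littleDigits N, d < 10 := by
  unfold littleDigits
  split
  · intro d hd; simp at hd; omega
  · intro d hd; exact Nat.digits_lt_base (by norm_num) hd

lemma digitChar_isDigit {d : Nat} (hd : d < 10) : (Nat.digitChar d).isDigit = true := by
  interval_cases d <;> decide

lemma toDigitsCore_eq (f : Nat) : ∀ (n : Nat) (l : List Char), n ≠ 0 → n < f →
    Nat.toDigitsCore 10 f n l = ((Nat.digits 10 n).map Nat.digitChar).reverse ++ l := by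
  induction f with
  | zero => intro n l h hf; omega
  | succ f ih =>
    intro n l h hf
    rw [Nat.toDigitsCore, Nat.digits_def' (by norm_num : (1:Nat) < 10) (by omega : 0 < n)]
    by_cases h10 : n / 10 = 0
    · have hlt : n < 10 := by omega
      simp [h10, Nat.mod_eq_of_lt hlt]
    · have h1 : n / 10 < f := by
        have := Nat.div_lt_self (by omega : 0 < n) (by norm_num : 1 < 10)
        omega
      simp only [h10, if_false]
      rw [ih (n / 10) _ h10 h1]
      rw [Nat.digits_def' (by norm_num : (1:Nat) < 10) (by omega : 0 < n / 10)]
      simp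

lemma toChars_eq (N : Nat) :
    PySem.Int.toChars (N : Int) = ((littleDigits N).map Nat.digitChar).reverse := by
  by_cases h : N = 0
  · subst h; decide
  · rw [PySem.Int.toChars, if_neg (by omega), littleDigits, if_neg h]
    show Nat.toDigits 10 (Int.toNat N) = _
    rw [Int.toNat_natCast, Nat.toDigits, toDigitsCore_eq (N+1) N [] h (by omega)]
    simp

lemma foldA (s : List Char) (j : Nat) (hj : j ≤ s.length) :
    ((PySem.List.pyRange 0 (j : Int) 1).foldl
      (fun acc i => acc ++ [PySem.List.pyGetD s ((s.length : Int) - 1 - i) ' ']) [])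
    = s.reverse.take j := by
  induction j with
  | zero => simp [PySem.List.pyRange]
  | succ j ih =>
    have hji : ((j + 1 : Nat) : Int) = (j : Int) + 1 := by push_cast; ring
    rw [hji, PySem.List.pyRange_one_succ_right (by positivity), List.foldl_append,
        ih (by omega)]
    have hidx : ((s.length : Int) - 1 - (j : Int)) = ((s.length - 1 - j : Nat) : Int) := by
      omega
    have hlt : s.length - 1 - j < s.length := by omega
    have hrev : s.reverse[j]? = some s[s.length - 1 - j] := by
      rw [List.getElem?_eq_getElem (by simpa using by omega : j < s.reverse.length)]
      simp [List.getElem_reverse]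
    simp only [List.foldl_cons, List.foldl_nil, hidx, PySem.List.pyGetD_natCast,
      List.getD_eq_getElem s ' ' hlt, List.take_add_one, hrev]
    simp

lemma parse_acc (ds : List Nat) (h : ∀ d ∈ ds, d < 10) : ∀ (a : Int),
    (ds.map Nat.digitChar).foldl (fun a c => a * 10 + ((c.toNat : Int) - 48)) a
      = a * 10 ^ ds.length + ((Nat.ofDigits 10 ds.reverse : Nat) : Int) := by
  induction ds with
  | nil => intro a; simp
  | cons d tl ih =>
    intro a
    have hd : d < 10 := h d (by simp)
    have htoNat : ((Nat.digitChar d).toNat : Int) = d + 48 := by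
      have : (Nat.digitChar d).toNat = d + 48 := by interval_cases d <;> decide
      rw [this]; push_cast; ring
    simp only [List.map_cons, List.foldl_cons, htoNat]
    rw [ih (fun x hx => h x (by simp [hx]))]
    rw [List.reverse_cons]
    rw [show ((Nat.ofDigits 10 (tl.reverse ++ [d]) : Nat)) =
        Nat.ofDigits 10 tl.reverse + 10 ^ tl.length * d by
      rw [Nat.ofDigits_append, Nat.ofDigits_singleton, List.length_reverse]]
    push_cast [List.length_cons, pow_succ]
    ring

lemma digits_getD (j : Nat) : ∀ N : Nat, (littleDigits N).getD j 0 = N / 10 ^ j % 10 := by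
  induction j with
  | zero =>
    intro N
    by_cases h : N = 0
    · simp [littleDigits, h]
    · rw [littleDigits, if_neg h, Nat.digits_def' (by norm_num : (1:Nat) < 10) (by omega)]
      simp
  | succ j ih =>
    intro N
    by_cases h : N = 0
    · simp [littleDigits, h]
    · rw [littleDigits, if_neg h, Nat.digits_def' (by norm_num : (1:Nat) < 10) (by omega)]
      have h2 : (Nat.digits 10 (N / 10)).getD j 0 = N / 10 / 10 ^ j % 10 := by
        by_cases h10 : N / 10 = 0
        · simp [h10]
        · have := ih (N / 10); rwa [littleDigits, if_neg h10] at this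
      simp only [List.getD_cons_succ, h2]
      rw [Nat.div_div_eq_div_mul, pow_succ]
      ring_nf

lemma padTake_succ (L : List Nat) (j : Nat) :
    padTake L (j + 1) = padTake L j ++ [L.getD j 0] := by
  unfold padTake
  by_cases h : j < L.length
  · have hz1 : j - L.length = 0 := by omega
    have hz2 : j + 1 - L.length = 0 := by omega
    rw [List.take_add_one]
    have hj : L[j]? = some L[j] := List.getElem?_eq_getElem h
    simp [hj, hz1, hz2]
  · have hle : L.length ≤ j := by omega
    rw [List.take_of_length_le (by omega), List.take_of_length_le hle]
    rw [show j + 1 - L.length = (j - L.length) + 1 by omega, List.replicate_succ']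
    simp [List.getD, List.getElem?_eq_none (by omega : L.length ≤ j)]

lemma foldB (N : Nat) (j : Nat) :
    (PySem.List.pyRange 0 (j : Int) 1).foldl
      (fun st _ => (st.1 * 10 + PySem.Int.mod st.2 10, PySem.Int.floordiv st.2 10))
      (0, (N : Int))
    = (((Nat.ofDigits 10 (padTake (littleDigits N) j).reverse : Nat) : Int),
       ((N / 10 ^ j : Nat) : Int)) := by
  induction j with
  | zero => simp [PySem.List.pyRange, padTake]
  | succ j ih =>
    have hji : ((j + 1 : Nat) : Int) = (j : Int) + 1 := by push_cast; ring
    rw [hji, PySem.List.pyRange_one_succ_right (by positivity), List.foldl_append, ih]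
    have hmod : PySem.Int.mod ((N / 10 ^ j : Nat) : Int) 10 = ((N / 10 ^ j % 10 : Nat) : Int) := by
      exact_mod_cast PySem.Int.mod_natCast (N / 10 ^ j) 10
    have hdiv : PySem.Int.floordiv ((N / 10 ^ j : Nat) : Int) 10 = ((N / 10 ^ (j+1) : Nat) : Int) := by
      rw [show N / 10 ^ (j+1) = N / 10 ^ j / 10 by rw [Nat.div_div_eq_div_mul, pow_succ]]
      exact_mod_cast PySem.Int.floordiv_natCast (N / 10 ^ j) 10
    simp only [List.foldl_cons, List.foldl_nil, hmod, hdiv]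
    rw [padTake_succ, List.reverse_append]
    simp only [List.reverse_cons, List.reverse_nil, List.nil_append, List.singleton_append]
    rw [Nat.ofDigits_cons, digits_getD]
    push_cast
    ring_nf

-- ===== VERDICT (by name: the statement is the Claim_ definition above) =====
theorem kchiffres_spec : Claim_equal_kchiffres := by
  intro nombre k _ hpre
  unfold Spec_kchiffres
  obtain ⟨h0, h1⟩ := hpre
  obtain ⟨N, rfl⟩ : ∃ N : Nat, nombre = (N : Int) := ⟨nombre.toNat, (Int.toNat_of_nonneg h0).symm⟩
  obtain ⟨K, rfl⟩ : ∃ K : Nat, k = (K : Int) := ⟨k.toNat, (Int.toNat_of_nonneg (by omega)).symm⟩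
  have hK : 1 ≤ K := by exact_mod_cast h1
  have hLne := littleDigits_ne_nil N
  have hLlt := littleDigits_lt N
  rw [kchiffres_alt, foldB N K]
  rw [kchiffres]
  simp only [toChars_eq N, PySem.List.len_eq, List.length_reverse, List.length_map]
  by_cases hcase : K ≤ (littleDigits N).length
  · rw [if_pos (by exact_mod_cast hcase)]
    have hA := foldA ((littleDigits N).map Nat.digitChar).reverse K
      (by simpa using hcase)
    simp only [List.length_reverse, List.length_map] at hA
    rw [hA, List.reverse_reverse, ← List.map_take]
    have hpad : padTake (littleDigits N) K = (littleDigits N).take K := by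
      unfold padTake
      rw [Nat.sub_eq_zero_of_le hcase]
      simp
    rw [pyIntAllDigits, if_pos ?_]
    · rw [parse_acc _ (fun d hd => hLlt d (List.mem_of_mem_take hd)) 0, hpad]
      simp
    · constructor
      · simp only [ne_eq, List.map_eq_nil_iff, List.take_eq_nil_iff]
        rintro (h | h)
        · omega
        · exact hLne h
      · simp only [List.all_map, List.all_eq_true]
        intro d hd
        exact digitChar_isDigit (hLlt d (List.mem_of_mem_take hd))
  · rw [if_neg (by exact_mod_cast hcase)]
    have hA := foldA ((littleDigits N).map Nat.digitChar).reverse (littleDigits N).length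
      (by simp)
    simp only [List.length_reverse, List.length_map] at hA
    rw [hA, List.reverse_reverse, List.take_of_length_le (by simp)]
    have hz : ((K : Int) - ((littleDigits N).length : Int)).toNat = K - (littleDigits N).length := by
      omega
    rw [hz]
    have hrep : List.replicate (K - (littleDigits N).length) '0'
        = (List.replicate (K - (littleDigits N).length) 0).map Nat.digitChar := by
      rw [List.map_replicate]
      rfl
    rw [hrep, ← List.map_append]
    have hpad : padTake (littleDigits N) K
        = littleDigits N ++ List.replicate (K - (littleDigits N).length) 0 := by
      unfold padTake
      rw [List.take_of_length_le (by omega)]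
    have hdig : ∀ d ∈ littleDigits N ++ List.replicate (K - (littleDigits N).length) 0, d < 10 := by
      intro d hd
      rcases List.mem_append.mp hd with h | h
      · exact hLlt d h
      · have := List.eq_of_mem_replicate h
        omega
    rw [pyIntAllDigits, if_pos ?_]
    · rw [parse_acc _ hdig 0, hpad]
      simp
    · constructor
      · simp only [ne_eq, List.map_eq_nil_iff, List.append_eq_nil_iff]
        intro ⟨hc, _⟩
        exact hLne hc
      · simp only [List.all_map, List.all_eq_true]
        intro d hd
        exact digitChar_isDigit (hdig d hd)
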